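-- pv_equiv track=rewrite | github.com/kleinpanic/The-Stein-Files | scripts/auto_tagging.py | tag_summary
-- ===== SOURCE A (Python) =====
-- from typing import List, Set
--
-- def tag_summary(tags: List[str]) -> dict:
--     """
--     Organize tags into categories for display.
--
--     Returns:
--         {
--             "keywords": [...],
--             "sources": [...],
--             "people": [...],
--             "locations": [...],
--             "decades": [...],
--         }
--     """
--     summary = {
--         "keywords": [],
--         "sources": [],
--         "people": [],
--         "locations": [],
--         "decades": [],
--     }
--
--     for tag in tags:
--         if tag.startswith("person:"):
--             summary["people"].append(tag[7:])  # strip "person:" prefix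
--         elif tag.startswith("location:"):
--             summary["locations"].append(tag[9:])  # strip "location:" prefix
--         elif tag.endswith("s") and tag[:-1].isdigit():  # decade tags like "1990s"
--             summary["decades"].append(tag)
--         elif tag in ["fbi", "court", "deposition", "subpoena", "evidence-photo", "flight-log"]:
--             summary["sources"].append(tag)
--         else:
--             summary["keywords"].append(tag)
--
--     return summary
-- ===== SOURCE B (Python) =====
-- from typing import List
--
-- _CATEGORIES = ("keywords", "sources", "people", "locations", "decades")
--
-- def _classify(tag: str):
--     """Map a tag to its (category, displayed value) pair."""
--     if tag.startswith("person:"):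
--         return ("people", tag[7:])
--     if tag.startswith("location:"):
--         return ("locations", tag[9:])
--     if tag.endswith("s") and tag[:-1].isdigit():
--         return ("decades", tag)
--     if tag in ("fbi", "court", "deposition", "subpoena", "evidence-photo", "flight-log"):
--         return ("sources", tag)
--     return ("keywords", tag)
--
-- def tag_summary(tags: List[str]) -> dict:
--     pairs = [_classify(t) for t in tags]
--     return {cat: [v for c, v in pairs if c == cat] for cat in _CATEGORIES}
-- ===== Notes on version B (the rewrite author's own statement) =====
-- stated objective: idiomatic
-- what changed: B replaces A's single append-loop over a mutable dict with a classify function mapping each tag to a (category, value) pair once, then builds the summary as a dict comprehension grouping the classified pairs per category.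
import Mathlib
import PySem

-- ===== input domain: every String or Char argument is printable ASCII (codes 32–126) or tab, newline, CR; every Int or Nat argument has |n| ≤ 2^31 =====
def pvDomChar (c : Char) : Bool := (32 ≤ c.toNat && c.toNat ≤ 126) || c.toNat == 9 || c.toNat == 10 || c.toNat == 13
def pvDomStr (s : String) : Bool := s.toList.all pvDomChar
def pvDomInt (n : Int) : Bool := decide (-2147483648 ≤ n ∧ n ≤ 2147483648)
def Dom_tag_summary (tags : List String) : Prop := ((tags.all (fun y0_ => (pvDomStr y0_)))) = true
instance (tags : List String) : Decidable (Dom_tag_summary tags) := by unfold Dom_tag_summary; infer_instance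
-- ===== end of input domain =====

-- B is the same task written as classify-then-group (a pure classification map plus a
-- comprehension per category) instead of A's append-loop over a mutable dict; same cost.

-- ===== PORT A =====
-- A's loop body: branch on the tag and append to the matching dict entry in place.
def tagStep (summary : PySem.Dict String (List String)) (tag : String) : PySem.Dict String (List String) :=
  if PySem.Str.startswith tag "person:" then
    summary.modify "people" [] (· ++ [PySem.Str.slice tag (some 7) none])
  else if PySem.Str.startswith tag "location:" then
    summary.modify "locations" [] (· ++ [PySem.Str.slice tag (some 9) none])
  else if PySem.Str.endswith tag "s" && PySem.Str.strIsdigit (PySem.Str.slice tag none (some (-1))) then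
    summary.modify "decades" [] (· ++ [tag])
  else if ["fbi", "court", "deposition", "subpoena", "evidence-photo", "flight-log"].contains tag then
    summary.modify "sources" [] (· ++ [tag])
  else
    summary.modify "keywords" [] (· ++ [tag])

def tag_summary (tags : List String) : List (String × List String) :=
  let summary : PySem.Dict String (List String) :=
    PySem.Dict.ofList [("keywords", []), ("sources", []), ("people", []), ("locations", []), ("decades", [])]
  (tags.foldl tagStep summary).items

-- ===== PORT B =====
def classify (tag : String) : String × String :=
  if PySem.Str.startswith tag "person:" then ("people", PySem.Str.slice tag (some 7) none)
  else if PySem.Str.startswith tag "location:" then ("locations", PySem.Str.slice tag (some 9) none)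
  else if PySem.Str.endswith tag "s" && PySem.Str.strIsdigit (PySem.Str.slice tag none (some (-1))) then ("decades", tag)
  else if ["fbi", "court", "deposition", "subpoena", "evidence-photo", "flight-log"].contains tag then ("sources", tag)
  else ("keywords", tag)

def tag_summary_alt (tags : List String) : List (String × List String) :=
  let pairs := tags.map classify
  ["keywords", "sources", "people", "locations", "decades"].map
    (fun cat => (cat, (pairs.filter (fun p => p.1 == cat)).map (·.2)))

-- ===== PRECONDITION & SPEC =====
def Spec_tag_summary (tags : List String) (out : List (String × List String)) : Prop := out = tag_summary_alt tags
instance (tags : List String) (out : List (String × List String)) : Decidable (Spec_tag_summary tags out) := by unfold Spec_tag_summary; infer_instance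

-- ===== CLAIM (what is proved, stated in full; the proofs are below) =====
def Claim_equal_tag_summary : Prop := ∀ (tags : List String), Dom_tag_summary tags → Spec_tag_summary tags (tag_summary tags)

-- ===== LEMMAS AND PROOFS =====

-- B's per-category list, seen from the left.
def grp (cat : String) (tags : List String) : List String :=
  ((tags.map classify).filter (fun p => p.1 == cat)).map (·.2)

theorem grp_cons (cat : String) (t : String) (ts : List String) :
    grp cat (t :: ts) = if (classify t).1 == cat then (classify t).2 :: grp cat ts else grp cat ts := by
  simp only [grp, List.map_cons, List.filter_cons]
  split <;> simp_all

-- Invariant of A's fold over the literal five-key dict.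
theorem foldl_tagStep (tags : List String) (K S P L D : List String) :
    (tags.foldl tagStep (PySem.Dict.mk
        [("keywords", K), ("sources", S), ("people", P), ("locations", L), ("decades", D)])).items
    = [("keywords", K ++ grp "keywords" tags), ("sources", S ++ grp "sources" tags),
       ("people", P ++ grp "people" tags), ("locations", L ++ grp "locations" tags),
       ("decades", D ++ grp "decades" tags)] := by
  induction tags generalizing K S P L D with
  | nil => simp [grp]
  | cons t ts ih =>
    have hstep : ∀ d : PySem.Dict String (List String), tagStep d t = d.modify (classify t).1 [] (· ++ [(classify t).2]) := by
      intro d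
      simp only [tagStep, classify]
      split_ifs <;> rfl
    rw [List.foldl_cons, hstep]
    have hcat : (classify t).1 = "keywords" ∨ (classify t).1 = "sources" ∨ (classify t).1 = "people" ∨
        (classify t).1 = "locations" ∨ (classify t).1 = "decades" := by
      simp only [classify]; split_ifs <;> simp
    rcases hcat with h | h | h | h | h <;>
      rw [h] <;>
      simp only [PySem.Dict.modify, PySem.Dict.get?, PySem.Dict.getD, PySem.Dict.insert] <;>
      simp <;>
      rw [ih] <;>
      simp [grp_cons, h]

theorem tag_summary_eq (tags : List String) : tag_summary tags = tag_summary_alt tags := by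
  have h0 : (PySem.Dict.ofList [("keywords", ([] : List String)), ("sources", []), ("people", []),
      ("locations", []), ("decades", [])]) = PySem.Dict.mk
      [("keywords", []), ("sources", []), ("people", []), ("locations", []), ("decades", [])] := by
    decide
  simp only [tag_summary, h0, foldl_tagStep, tag_summary_alt, List.map_cons, List.map_nil]
  simp [grp]

-- ===== VERDICT (by name: the statement is the Claim_ definition above) =====
theorem tag_summary_spec : Claim_equal_tag_summary := by
  intro tags _
  unfold Spec_tag_summary
  exact tag_summary_eq tags
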